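-- pv_equiv track=rewrite | github.com/fantauzzi/bioalg | chapter06/rearrange.py | graph_to_genome
-- ===== SOURCE A (Python) =====
-- from itertools import chain, islice
--
-- def pairwise(seq):
--     assert len(seq) % 2 == 0
--     return zip(islice(seq, 0, None, 2), islice(seq, 1, None, 2))
--
-- def cycle_to_chromosome(cycle):
--     chromosome = [item2 // 2 if item1 < item2 else -item1 // 2 for item1, item2 in pairwise(cycle)]
--     return chromosome
--
-- def graph_to_genome(edges):
--     def get_block(vertex):
--         block = vertex // 2 if vertex % 2 == 0 else (vertex + 1) // 2
--         return block
--
--     genome = []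
--     cycle = []
--     cycle_start = None
--     for edge in edges:
--         if cycle_start is None:
--             cycle_start = edge[0]
--         cycle.extend(edge)
--         block_0, block_1 = get_block(edge[0]), get_block(edge[1])
--         is_trivial_cycle = block_0 == block_1
--         if ((edge[1] + 1 == cycle_start or edge[1] - 1 == cycle_start) and edge[0] != cycle_start) or is_trivial_cycle:
--             cycle = [cycle[-1]] + cycle[0:len(cycle) - 1]
--             genome.append(cycle_to_chromosome(cycle))
--             cycle = []
--             cycle_start = None
--     return genome
-- ===== SOURCE B (Python) =====
-- def graph_to_genome(edges):
--     def get_block(vertex):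
--         return vertex // 2 if vertex % 2 == 0 else (vertex + 1) // 2
--
--     # Phase one: group the edges into raw cycles (lists of edges).
--     cycles = []
--     current = []
--     start = None
--     for a, b in edges:
--         if start is None:
--             start = a
--         current.append((a, b))
--         if (abs(b - start) == 1 and a != start) or get_block(a) == get_block(b):
--             cycles.append(current)
--             current = []
--             start = None
--
--     # Phase two: convert each cycle of edges directly to a chromosome.
--     # The pair feeding block i is (second of previous edge, first of edge i),
--     # cyclically, so no flat list is built and no rotation is performed.
--     genome = []
--     for cyc in cycles:
--         prev = cyc[-1][1]
--         chromosome = []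
--         for a, b in cyc:
--             chromosome.append(a // 2 if prev < a else -prev // 2)
--             prev = b
--         genome.append(chromosome)
--     return genome
-- ===== Notes on version B (the rewrite author's own statement) =====
-- stated objective: alternative
-- what changed: B splits A's single interleaved loop into two phases: first it groups the edges into raw cycles kept as lists of edge pairs, then it maps each cycle to a chromosome by pairing each edge's first vertex with the previous edge's second vertex cyclically, so the flat vertex list, the rotation [c[-1]]+c[:-1] and the pairwise zip of A disappear.
import Mathlib
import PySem

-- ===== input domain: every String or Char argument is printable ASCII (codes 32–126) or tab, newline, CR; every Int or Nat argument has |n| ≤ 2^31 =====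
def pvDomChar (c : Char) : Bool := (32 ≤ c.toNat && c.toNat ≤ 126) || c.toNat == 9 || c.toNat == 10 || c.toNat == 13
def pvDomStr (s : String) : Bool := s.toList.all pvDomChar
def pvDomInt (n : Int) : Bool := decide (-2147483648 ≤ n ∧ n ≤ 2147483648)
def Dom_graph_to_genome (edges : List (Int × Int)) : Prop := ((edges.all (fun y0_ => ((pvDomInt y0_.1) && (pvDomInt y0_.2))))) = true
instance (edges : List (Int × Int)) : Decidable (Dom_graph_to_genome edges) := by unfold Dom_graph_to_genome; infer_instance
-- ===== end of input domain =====

-- B regroups edges into raw cycles first, then maps each cycle directly to a chromosome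
-- (pairing across consecutive edges cyclically), replacing A's flat-list rotation; objective: alternative.


-- ===== PORT A =====
-- pairwise(seq): zip of even- and odd-indexed elements (seq always has even length here)
def pvPairwiseA (seq : List Int) : List (Int × Int) :=
  match seq with
  | a :: b :: rest => (a, b) :: pvPairwiseA rest
  | _ => []

def pvCycleToChromosomeA (cycle : List Int) : List Int :=
  (pvPairwiseA cycle).map (fun p =>
    if p.1 < p.2 then PySem.Int.floordiv p.2 2 else PySem.Int.floordiv (-p.1) 2)

def pvGetBlockA (vertex : Int) : Int :=
  if PySem.Int.mod vertex 2 = 0 then PySem.Int.floordiv vertex 2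
  else PySem.Int.floordiv (vertex + 1) 2

-- one iteration of A's for-loop; state = (genome, cycle, cycle_start)
def pvStepA (st : List (List Int) × List Int × Option Int) (edge : Int × Int) :
    List (List Int) × List Int × Option Int :=
  let cycle_start : Int := match st.2.2 with | none => edge.1 | some s => s
  let cycle := st.2.1 ++ [edge.1, edge.2]
  let block_0 := pvGetBlockA edge.1
  let block_1 := pvGetBlockA edge.2
  let is_trivial_cycle := block_0 = block_1
  if ((edge.2 + 1 = cycle_start ∨ edge.2 - 1 = cycle_start) ∧ edge.1 ≠ cycle_start) ∨ is_trivial_cycle then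
    let cycle' := (match PySem.List.pyGet? cycle (-1) with | some x => [x] | none => [])
                  ++ PySem.List.slice cycle (some 0) (some ((cycle.length : Int) - 1))
    (st.1 ++ [pvCycleToChromosomeA cycle'], [], none)
  else
    (st.1, cycle, some cycle_start)

def graph_to_genome (edges : List (Int × Int)) : List (List Int) :=
  (edges.foldl pvStepA ([], [], none)).1

-- ===== PORT B =====
def pvGetBlockB (vertex : Int) : Int :=
  if PySem.Int.mod vertex 2 = 0 then PySem.Int.floordiv vertex 2
  else PySem.Int.floordiv (vertex + 1) 2

-- phase one: group the edges into raw cycles (lists of edge pairs)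
def pvCollectB (edges : List (Int × Int)) (current : List (Int × Int)) (start : Option Int) :
    List (List (Int × Int)) :=
  match edges with
  | [] => []
  | (a, b) :: rest =>
    let s := start.getD a
    let current' := current ++ [(a, b)]
    if ((b - s).natAbs = 1 ∧ a ≠ s) ∨ pvGetBlockB a = pvGetBlockB b then
      current' :: pvCollectB rest [] none
    else
      pvCollectB rest current' (some s)

-- phase two inner loop: prev = second vertex of the previous edge (cyclically)
def pvChromB (prev : Int) (cyc : List (Int × Int)) : List Int :=
  match cyc with
  | [] => []
  | (a, b) :: rest =>
    (if prev < a then PySem.Int.floordiv a 2 else PySem.Int.floordiv (-prev) 2) :: pvChromB b rest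

def pvCycleChromB (cyc : List (Int × Int)) : List Int :=
  match cyc.getLast? with
  | some e => pvChromB e.2 cyc
  | none => []

def graph_to_genome_alt (edges : List (Int × Int)) : List (List Int) :=
  (pvCollectB edges [] none).map pvCycleChromB

-- ===== PRECONDITION & SPEC =====
def Spec_graph_to_genome (edges : List (Int × Int)) (out : List (List Int)) : Prop := out = graph_to_genome_alt edges
instance (edges : List (Int × Int)) (out : List (List Int)) : Decidable (Spec_graph_to_genome edges out) := by unfold Spec_graph_to_genome; infer_instance

-- ===== CLAIM (what is proved, stated in full; the proofs are below) =====
def Claim_equal_graph_to_genome : Prop := ∀ (edges : List (Int × Int)), Dom_graph_to_genome edges → Spec_graph_to_genome edges (graph_to_genome edges)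

-- ===== LEMMAS AND PROOFS =====

-- flatten a list of edges into A's flat vertex list
def pvFlat (cur : List (Int × Int)) : List Int := cur.flatMap (fun p => [p.1, p.2])

lemma pvFlat_append_pair (cur : List (Int × Int)) (a b : Int) :
    pvFlat cur ++ [a, b] = pvFlat (cur ++ [(a, b)]) := by
  simp [pvFlat]

-- the rotated flat cycle is b :: pvFlat cur ++ [a]
lemma pvRotate_eq (cur : List (Int × Int)) (a b : Int) :
    (match PySem.List.pyGet? (pvFlat cur ++ [a, b]) (-1) with | some x => [x] | none => [])
      ++ PySem.List.slice (pvFlat cur ++ [a, b]) (some 0)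
          (some (((pvFlat cur ++ [a, b]).length : Int) - 1)) =
    b :: (pvFlat cur ++ [a]) := by
  have h1 : PySem.List.pyGet? (pvFlat cur ++ [a, b]) (-1) = some b := by
    have : pvFlat cur ++ [a, b] = (pvFlat cur ++ [a]) ++ [b] := by simp
    rw [this, PySem.List.pyGet?_neg_one_append_singleton]
  have h2 : PySem.List.slice (pvFlat cur ++ [a, b]) (some 0)
      (some (((pvFlat cur ++ [a, b]).length : Int) - 1)) = pvFlat cur ++ [a] := by
    have hl : (((pvFlat cur ++ [a, b]).length : Int) - 1)
        = (((pvFlat cur ++ [a, b]).length - 1 : Nat) : Int) := by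
      simp; omega
    rw [hl]
    rw [PySem.List.slice_zero_start, PySem.List.slice_to_natCast]
    have : pvFlat cur ++ [a, b] = (pvFlat cur ++ [a]) ++ [b] := by simp
    rw [this]
    simp only [List.length_append, List.length_cons, List.length_nil]
    have h : (pvFlat cur ++ [a]).length = (pvFlat cur).length + 1 + 1 - 1 := by simp
    rw [← h, List.take_left]
  rw [h1, h2]
  simp

-- B's direct chromosome equals A's pairwise-over-rotated-flat-list chromosome
lemma pvChrom_eq (cur : List (Int × Int)) (prev a b : Int) :
    pvChromB prev (cur ++ [(a, b)]) = pvCycleToChromosomeA (prev :: (pvFlat cur ++ [a])) := by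
  induction cur generalizing prev with
  | nil => simp [pvChromB, pvCycleToChromosomeA, pvPairwiseA, pvFlat]
  | cons e cs ih =>
    obtain ⟨x, y⟩ := e
    have hflat : pvFlat ((x, y) :: cs) ++ [a] = x :: y :: (pvFlat cs ++ [a]) := by
      simp [pvFlat]
    calc pvChromB prev (((x, y) :: cs) ++ [(a, b)])
        = (if prev < x then PySem.Int.floordiv x 2 else PySem.Int.floordiv (-prev) 2)
            :: pvChromB y (cs ++ [(a, b)]) := rfl
      _ = (if prev < x then PySem.Int.floordiv x 2 else PySem.Int.floordiv (-prev) 2)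
            :: pvCycleToChromosomeA (y :: (pvFlat cs ++ [a])) := by rw [ih]
      _ = pvCycleToChromosomeA (prev :: (pvFlat ((x, y) :: cs) ++ [a])) := by
          rw [hflat]; rfl

-- the completion conditions of A and B agree
lemma pvCond_eq (a b s : Int) :
    ((((b + 1 = s ∨ b - 1 = s) ∧ a ≠ s) ∨ pvGetBlockA a = pvGetBlockA b)
      ↔ (((b - s).natAbs = 1 ∧ a ≠ s) ∨ pvGetBlockB a = pvGetBlockB b)) := by
  constructor <;> rintro (⟨h1, h2⟩ | h3)
  · exact Or.inl ⟨by omega, h2⟩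
  · exact Or.inr h3
  · exact Or.inl ⟨by omega, h2⟩
  · exact Or.inr h3

-- the single loop invariant: A's fold from any state equals genome ++ B's two phases
lemma pvMain (edges : List (Int × Int)) :
    ∀ (genome : List (List Int)) (cur : List (Int × Int)) (start : Option Int),
    (edges.foldl pvStepA (genome, pvFlat cur, start)).1
      = genome ++ (pvCollectB edges cur start).map pvCycleChromB := by
  induction edges with
  | nil => intro genome cur start; simp [pvCollectB]
  | cons e rest ih =>
    intro genome cur start
    obtain ⟨a, b⟩ := e
    have hs : (match start with | none => a | some s => s) = start.getD a := by
      cases start <;> rfl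
    simp only [List.foldl_cons, pvCollectB, pvStepA, hs]
    set s := start.getD a with hsdef
    by_cases hc : (((b + 1 = s ∨ b - 1 = s) ∧ a ≠ s) ∨ pvGetBlockA a = pvGetBlockA b)
    · have hc' : (((b - s).natAbs = 1 ∧ a ≠ s) ∨ pvGetBlockB a = pvGetBlockB b) :=
        (pvCond_eq a b s).mp hc
      rw [if_pos hc, if_pos hc']
      have hchrom : pvCycleChromB (cur ++ [(a, b)]) = pvCycleToChromosomeA (b :: (pvFlat cur ++ [a])) := by
        unfold pvCycleChromB
        rw [List.getLast?_concat]
        exact pvChrom_eq cur b a b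
      rw [pvRotate_eq cur a b, List.map_cons, hchrom]
      have h0 : pvFlat ([] : List (Int × Int)) = [] := rfl
      have ih0 := ih (genome ++ [pvCycleToChromosomeA (b :: (pvFlat cur ++ [a]))]) [] none
      rw [h0] at ih0
      rw [ih0]
      simp
    · have hc' : ¬ (((b - s).natAbs = 1 ∧ a ≠ s) ∨ pvGetBlockB a = pvGetBlockB b) := by
        intro h; exact hc ((pvCond_eq a b s).mpr h)
      rw [if_neg hc, if_neg hc']
      rw [pvFlat_append_pair]
      exact ih genome (cur ++ [(a, b)]) (some s)

-- ===== VERDICT (by name: the statement is the Claim_ definition above) =====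
theorem graph_to_genome_spec : Claim_equal_graph_to_genome := by
  intro edges _
  show graph_to_genome edges = graph_to_genome_alt edges
  have h := pvMain edges [] [] none
  simpa [graph_to_genome, graph_to_genome_alt, pvFlat] using h
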